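-- pv_equiv track=rewrite | github.com/marisbotero/Python_I | Hackerrank/string_Repeat.py | reapetedstring
-- ===== SOURCE A (Python) =====
-- def reapetedstring(s,n):
--     len_str = len(s)
--
--     num_strs = n//len_str
--
--     remainder = n %len_str
--
--     count1 = 0
--
--     count2 = 0
--
--     for i in range(len_str):
--         if s[i] =='a':
--             count1 += 1
--         if s[i]== 'a' and i<remainder:
--             count2 += 1
--
--     total = count1* num_strs + count2
--
--     return total
-- ===== SOURCE B (Python) =====
-- def reapetedstring(s, n):
--     # Index every 'a' position once, then binary-search the remainder boundary:
--     # each full period contributes len(pos) and the leading n%len(s) chars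
--     # contribute the number of indexed positions below that boundary.
--     pos = [i for i, c in enumerate(s) if c == 'a']
--     q = n // len(s)
--     r = n % len(s)
--     lo, hi = 0, len(pos)
--     while lo < hi:
--         mid = (lo + hi) // 2
--         if pos[mid] < r:
--             lo = mid + 1
--         else:
--             hi = mid
--     return q * len(pos) + lo
-- ===== Notes on version B (the rewrite author's own statement) =====
-- stated objective: alternative
-- what changed: A's single fused loop with two ad-hoc counters is replaced by a different data structure: one pass builds an index of all 'a' positions, and the remainder contribution is found by a hand-written binary search for the n%len(s) boundary in that sorted index, combined as q*len(pos)+boundary.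
-- outside the precondition, e.g. on reapetedstring('', 5): A raises ZeroDivisionError, B raises ZeroDivisionError
import Mathlib
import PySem

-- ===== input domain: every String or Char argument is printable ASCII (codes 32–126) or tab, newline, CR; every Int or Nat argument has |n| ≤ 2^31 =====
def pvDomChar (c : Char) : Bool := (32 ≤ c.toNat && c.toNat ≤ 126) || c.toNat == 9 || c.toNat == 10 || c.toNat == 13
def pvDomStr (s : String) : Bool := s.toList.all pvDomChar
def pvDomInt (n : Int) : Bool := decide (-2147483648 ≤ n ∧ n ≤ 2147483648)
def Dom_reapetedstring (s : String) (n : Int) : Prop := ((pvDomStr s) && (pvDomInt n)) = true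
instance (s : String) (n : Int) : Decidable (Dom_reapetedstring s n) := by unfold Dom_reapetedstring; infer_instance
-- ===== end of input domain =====

-- B replaces A's fused counting loop by a one-pass index of 'a' positions plus a binary search
-- for the remainder boundary; objective: alternative (different data structure, same cost).

-- ===== PORT A =====
def reapetedstring (s : String) (n : Int) : Int :=
  let len_str : Int := PySem.Str.len s
  let num_strs : Int := PySem.Int.floordiv n len_str
  let remainder : Int := PySem.Int.mod n len_str
  let cc : Int × Int := (PySem.List.pyRange 0 len_str 1).foldl
    (fun (p : Int × Int) i =>
      (if PySem.List.pyGetD s.toList i ' ' == 'a' then p.1 + 1 else p.1,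
       if (PySem.List.pyGetD s.toList i ' ' == 'a') && decide (i < remainder) then p.2 + 1 else p.2))
    (0, 0)
  cc.1 * num_strs + cc.2

-- ===== PORT B =====
-- the hand-written while-loop binary search of Source B (lo/hi halving on the position list)
def bsearchPos (pos : List Int) (r : Int) (lo hi : Nat) : Nat :=
  if _h : lo < hi then
    let mid := (lo + hi) / 2
    if PySem.List.pyGetD pos (mid : Int) 0 < r then bsearchPos pos r (mid + 1) hi
    else bsearchPos pos r lo mid
  else lo
termination_by hi - lo
decreasing_by all_goals omega

def reapetedstring_alt (s : String) (n : Int) : Int :=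
  let pos : List Int := ((PySem.List.enumerate s.toList 0).filter (fun p => p.2 == 'a')).map (·.1)
  let q : Int := PySem.Int.floordiv n (PySem.Str.len s)
  let r : Int := PySem.Int.mod n (PySem.Str.len s)
  let lo : Nat := bsearchPos pos r 0 pos.length
  q * (pos.length : Int) + (lo : Int)

-- ===== PRECONDITION & SPEC =====
-- Pre_ excludes only the empty string, on which Python A (and B) raise ZeroDivisionError.
def Pre_reapetedstring (s : String) (_n : Int) : Prop := s.toList ≠ []
instance (s : String) (n : Int) : Decidable (Pre_reapetedstring s n) := by unfold Pre_reapetedstring; infer_instance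
def pvWitness_reapetedstring : String × Int := ("aba", 10)

def Spec_reapetedstring (s : String) (n : Int) (out : Int) : Prop := out = reapetedstring_alt s n
instance (s : String) (n : Int) (out : Int) : Decidable (Spec_reapetedstring s n out) := by unfold Spec_reapetedstring; infer_instance

-- ===== CLAIM (what is proved, stated in full; the proofs are below) =====
def Claim_equal_reapetedstring : Prop := ∀ (s : String) (n : Int), Dom_reapetedstring s n → Pre_reapetedstring s n → Spec_reapetedstring s n (reapetedstring s n)

-- ===== LEMMAS AND PROOFS =====

-- the position list of Source B, parametrised by the enumerate start (for induction)
def posOf (cs : List Char) (s0 : Int) : List Int :=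
  ((PySem.List.enumerate cs s0).filter (fun p => p.2 == 'a')).map (·.1)

theorem posOf_nil (s0 : Int) : posOf [] s0 = [] := rfl

theorem posOf_cons (c : Char) (cs : List Char) (s0 : Int) :
    posOf (c :: cs) s0 = (if c == 'a' then [s0] else []) ++ posOf cs (s0 + 1) := by
  simp only [posOf, PySem.List.enumerate_cons, List.filter_cons]
  by_cases h : c = 'a' <;> simp [h]

theorem length_posOf (cs : List Char) (s0 : Int) :
    (posOf cs s0).length = cs.count 'a' := by
  induction cs generalizing s0 with
  | nil => rfl
  | cons c cs ih =>
    rw [posOf_cons, List.length_append, ih, List.count_cons]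
    by_cases h : c = 'a' <;> simp [h] <;> omega

theorem countP_posOf (cs : List Char) (s0 r : Int) :
    (posOf cs s0).countP (fun x => decide (x < r)) = (cs.take (r - s0).toNat).count 'a' := by
  induction cs generalizing s0 with
  | nil => simp [posOf_nil]
  | cons c cs ih =>
    rw [posOf_cons, List.countP_append, ih]
    have h1 : (r - (s0 + 1)).toNat = (r - s0).toNat - 1 := by omega
    by_cases hc : c = 'a'
    · by_cases hr : s0 < r
      · have h2 : (r - s0).toNat = ((r - s0).toNat - 1) + 1 := by omega
        rw [h2]
        simp [hc, hr, h1]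
        omega
      · have h2 : (r - s0).toNat = 0 := by omega
        simp [hc, hr, h1, h2]
    · by_cases hr0 : (r - s0).toNat = 0
      · simp [hc, hr0, h1]
      · have h2 : (r - s0).toNat = ((r - s0).toNat - 1) + 1 := by omega
        rw [h2]
        simp [hc, h1]

theorem sorted_posOf (cs : List Char) (s0 : Int) : (posOf cs s0).Pairwise (· ≤ ·) := by
  have h := PySem.List.pairwise_lt_enumerate cs s0
  have h2 := (h.filter (fun p => p.2 == 'a'))
  unfold posOf
  rw [List.pairwise_map]
  exact h2.imp (fun h => le_of_lt h)

-- if the first l elements satisfy p and the rest do not, countP p = l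
theorem countP_of_boundary (pos : List Int) (p : Int → Bool) (l : Nat) (hl : l ≤ pos.length)
    (h1 : ∀ i, (h : i < pos.length) → i < l → p pos[i])
    (h2 : ∀ i, (h : i < pos.length) → l ≤ i → ¬ p pos[i]) :
    pos.countP p = l := by
  have hsplit : pos = pos.take l ++ pos.drop l := (List.take_append_drop l pos).symm
  rw [hsplit, List.countP_append]
  have ht : (pos.take l).countP p = l := by
    rw [List.countP_eq_length.mpr, List.length_take]
    · omega
    · intro x hx
      obtain ⟨i, hi, hx⟩ := List.mem_iff_getElem.mp hx
      have hil : i < l := by simp [List.length_take] at hi; omega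
      have hip : i < pos.length := by omega
      rw [← hx, List.getElem_take]
      exact h1 i hip hil
  have hd : (pos.drop l).countP p = 0 := by
    rw [List.countP_eq_zero]
    intro x hx
    obtain ⟨i, hi, hx⟩ := List.mem_iff_getElem.mp hx
    have hip : l + i < pos.length := by simp [List.length_drop] at hi; omega
    rw [← hx, List.getElem_drop]
    exact h2 (l + i) hip (by omega)
  omega

theorem bsearchPos_boundary (pos : List Int) (r : Int) (hsort : pos.Pairwise (· ≤ ·))
    (lo hi : Nat) (hlohi : lo ≤ hi) (hhi : hi ≤ pos.length)
    (hlo : ∀ i, (h : i < pos.length) → i < lo → pos[i] < r)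
    (hge : ∀ i, (h : i < pos.length) → hi ≤ i → ¬ pos[i] < r) :
    bsearchPos pos r lo hi = pos.countP (fun x => decide (x < r)) := by
  have hmono : ∀ i j, (hi : i < pos.length) → (hj : j < pos.length) → i ≤ j → pos[i] ≤ pos[j] := by
    intro i j hi' hj' hij
    rcases Nat.lt_or_ge i j with h | h
    · exact (List.pairwise_iff_getElem.mp hsort) i j hi' hj' h
    · have : i = j := by omega
      subst this; rfl
  unfold bsearchPos
  by_cases h : lo < hi
  · simp only [h, dif_pos]
    have hmidlt : (lo + hi) / 2 < hi := by omega
    have hmidge : lo ≤ (lo + hi) / 2 := by omega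
    have hmidlen : (lo + hi) / 2 < pos.length := by omega
    rw [show ((((lo + hi) / 2 : Nat) : Int)) = (((lo + hi) / 2 : Nat) : Int) from rfl]
    rw [PySem.List.pyGetD_natCast]
    rw [List.getD_eq_getElem?_getD, List.getElem?_eq_getElem hmidlen, Option.getD_some]
    by_cases hm : pos[(lo + hi) / 2] < r
    · simp only [hm, if_pos]
      apply bsearchPos_boundary pos r hsort _ _ (by omega) hhi
      · intro i hi' hil
        calc pos[i] ≤ pos[(lo + hi) / 2] := hmono i _ hi' hmidlen (by omega)
          _ < r := hm
      · exact hge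
    · simp only [hm, if_neg, not_false_eq_true]
      apply bsearchPos_boundary pos r hsort _ _ (by omega) (by omega)
      · exact hlo
      · intro i hi' hil hcon
        exact hm (lt_of_le_of_lt (hmono _ i hmidlen hi' hil) hcon)
  · simp only [h, dif_neg, not_false_eq_true]
    have hle : lo = hi := by omega
    subst hle
    exact (countP_of_boundary pos _ lo (by omega)
      (fun i h hi => by simpa using hlo i h hi)
      (fun i h hi => by simpa using hge i h hi)).symm
termination_by hi - lo
decreasing_by all_goals omega

-- A computes full-count times quotient plus remainder-prefix count
theorem A_closed (s : String) (n : Int) (h : s.toList ≠ []) :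
    reapetedstring s n = (s.toList.count 'a' : Int) * PySem.Int.floordiv n (s.toList.length : Int)
      + ((s.toList.take (PySem.Int.mod n (s.toList.length : Int)).toNat).count 'a' : Int) := by
  unfold reapetedstring
  simp only [PySem.Str.len_eq]
  set cs := s.toList with hcs
  have hL : 0 < (cs.length : Int) := by
    have := List.length_pos_iff.mpr h
    exact_mod_cast this
  set r := PySem.Int.mod n (cs.length : Int) with hr
  have hr0 : 0 ≤ r := PySem.Int.mod_nonneg _ hL
  have hrL : r < (cs.length : Int) := PySem.Int.mod_lt _ hL
  simp only [← hcs]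
  simp only [← hr]
  rw [PySem.List.foldl_prod_mk (f := fun acc i => if PySem.List.pyGetD cs i ' ' == 'a' then acc + 1 else acc) (g := fun acc i => if (PySem.List.pyGetD cs i ' ' == 'a') && decide (i < r) then acc + 1 else acc)]
  have hrn : ((cs.take r.toNat).length : Int) = r := by
    have : r.toNat ≤ cs.length := by omega
    simp [List.length_take, Int.toNat_of_nonneg hr0, Nat.min_eq_left this]
  have h1 : List.foldl (fun acc i => if (PySem.List.pyGetD cs i ' ' == 'a') then acc + 1 else acc) 0
      (PySem.List.pyRange 0 (cs.length : Int) 1) = (cs.count 'a' : Int) := by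
    rw [PySem.List.foldl_pyRange_zero_pyGetD' cs ' ' (fun acc x => if x == 'a' then acc + 1 else acc) 0,
        PySem.List.foldl_beq_add_one]
    simp
  have hA : ∀ a : Int, List.foldl (fun acc i => if (PySem.List.pyGetD cs i ' ' == 'a' && decide (i < r)) then acc + 1 else acc) a
      (PySem.List.pyRange 0 r 1) = a + ((cs.take r.toNat).count 'a' : Int) := by
    intro a
    set t := cs.take r.toNat with ht
    have e1 : List.foldl (fun acc i => if (PySem.List.pyGetD cs i ' ' == 'a' && decide (i < r)) then acc + 1 else acc) a
        (PySem.List.pyRange 0 r 1)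
        = List.foldl (fun acc i => if (PySem.List.pyGetD t i ' ' == 'a') then acc + 1 else acc) a
        (PySem.List.pyRange 0 r 1) := by
      refine PySem.List.foldl_congr_mem _ _ _ _ ?_
      intro acc x hx
      rw [PySem.List.mem_pyRange_one] at hx
      obtain ⟨hx0, hxr⟩ := hx
      have hxlt : decide (x < r) = true := by simpa using hxr
      have hk : x = ((x.toNat : Nat) : Int) := (Int.toNat_of_nonneg hx0).symm
      have hklt : x.toNat < r.toNat := by omega
      rw [hxlt, Bool.and_true, hk, PySem.List.pyGetD_natCast, PySem.List.pyGetD_natCast]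
      have : t.getD x.toNat ' ' = cs.getD x.toNat ' ' := by
        simp [ht, List.getD_eq_getElem?_getD, hklt]
      rw [this]
    rw [e1, ← hrn,
        PySem.List.foldl_pyRange_zero_pyGetD' t ' ' (fun acc x => if x == 'a' then acc + 1 else acc) a,
        PySem.List.foldl_beq_add_one]
  have hB : ∀ a : Int, List.foldl (fun acc i => if (PySem.List.pyGetD cs i ' ' == 'a' && decide (i < r)) then acc + 1 else acc) a
      (PySem.List.pyRange r (cs.length : Int) 1) = a := by
    intro a
    have e2 : List.foldl (fun acc i => if (PySem.List.pyGetD cs i ' ' == 'a' && decide (i < r)) then acc + 1 else acc) a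
        (PySem.List.pyRange r (cs.length : Int) 1)
        = List.foldl (fun acc _ => acc) a (PySem.List.pyRange r (cs.length : Int) 1) := by
      refine PySem.List.foldl_congr_mem _ _ _ _ ?_
      intro acc x hx
      rw [PySem.List.mem_pyRange_one] at hx
      have : decide (x < r) = false := by simpa using not_lt.mpr hx.1
      simp [this]
    rw [e2, PySem.List.foldl_ignore]
  have hsplit : PySem.List.pyRange 0 (cs.length : Int) 1
      = PySem.List.pyRange 0 r 1 ++ PySem.List.pyRange r (cs.length : Int) 1 :=
    PySem.List.pyRange_one_append 0 r (cs.length : Int) hr0 (le_of_lt hrL)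
  have h2 : List.foldl (fun acc i => if (PySem.List.pyGetD cs i ' ' == 'a' && decide (i < r)) then acc + 1 else acc) 0
      (PySem.List.pyRange 0 (cs.length : Int) 1) = ((cs.take r.toNat).count 'a' : Int) := by
    rw [hsplit, List.foldl_append, hA, hB]
    ring
  rw [h1, h2]

-- B computes the same closed form: pos.length = count 'a', the binary search = prefix count
theorem B_closed (s : String) (n : Int) :
    reapetedstring_alt s n = PySem.Int.floordiv n (s.toList.length : Int) * (s.toList.count 'a' : Int)
      + ((s.toList.take (PySem.Int.mod n (s.toList.length : Int)).toNat).count 'a' : Int) := by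
  unfold reapetedstring_alt
  simp only [PySem.Str.len_eq]
  set cs := s.toList with hcs
  set r := PySem.Int.mod n (cs.length : Int) with hr
  have hpos : ((PySem.List.enumerate cs 0).filter (fun p => p.2 == 'a')).map (·.1) = posOf cs 0 := rfl
  rw [hpos]
  have hbs : bsearchPos (posOf cs 0) r 0 (posOf cs 0).length
      = (posOf cs 0).countP (fun x => decide (x < r)) := by
    apply bsearchPos_boundary (posOf cs 0) r (sorted_posOf cs 0) 0 (posOf cs 0).length
      (by omega) (le_refl _)
    · intro i _ hi; omega
    · intro i hi' hli; omega
  rw [hbs, countP_posOf cs 0 r, length_posOf]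
  simp

-- ===== VERDICT (by name: the statement is the Claim_ definition above) =====
theorem reapetedstring_spec : Claim_equal_reapetedstring := by
  intro s n _ hpre
  unfold Spec_reapetedstring
  rw [A_closed s n hpre, B_closed s n]
  ring
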